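-- pv_equiv track=rewrite | github.com/alcedocoenen/MetaPlus | Plus-Minus App/3. Business Logic/3.2 FUNCTIONS/ConvertToMidi.py | convert_note_sequence_to_midi_sequences
-- ===== SOURCE A (Python) =====
-- def convert_note_sequence_to_midi_sequences(note_sequence):
--     # note_sequence is a list existing of notes
--     # each note is a list [a,b,c,d,e] => a = pitch, b = timepoint, c = duration, d = velocity, en e = channel.
--     midi_pitch_sequence = []
--     midi_timepoint_sequence = []
--     midi_duration_sequence = []
--     midi_volume_sequence = []
--     midi_channel_sequence = []
--
--     for note in note_sequence:
--         midi_pitch_sequence.append(note[0])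
--         midi_timepoint_sequence.append(note[1])
--         midi_duration_sequence.append(note[2])
--         midi_volume_sequence.append(note[3])
--         midi_channel_sequence.append(note[4])
--
--     return [midi_pitch_sequence, midi_timepoint_sequence, midi_duration_sequence, midi_volume_sequence, midi_channel_sequence]
-- ===== SOURCE B (Python) =====
-- def convert_note_sequence_to_midi_sequences(note_sequence):
--     # column-major: gather each of the five attribute columns across all notes
--     return [[note[i] for note in note_sequence] for i in range(5)]
-- ===== Notes on version B (the rewrite author's own statement) =====
-- stated objective: simpler
-- what changed: Replaces the single row-major loop scattering into five named accumulator lists with five column-major passes, one comprehension per attribute index 0-4.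
import Mathlib
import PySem

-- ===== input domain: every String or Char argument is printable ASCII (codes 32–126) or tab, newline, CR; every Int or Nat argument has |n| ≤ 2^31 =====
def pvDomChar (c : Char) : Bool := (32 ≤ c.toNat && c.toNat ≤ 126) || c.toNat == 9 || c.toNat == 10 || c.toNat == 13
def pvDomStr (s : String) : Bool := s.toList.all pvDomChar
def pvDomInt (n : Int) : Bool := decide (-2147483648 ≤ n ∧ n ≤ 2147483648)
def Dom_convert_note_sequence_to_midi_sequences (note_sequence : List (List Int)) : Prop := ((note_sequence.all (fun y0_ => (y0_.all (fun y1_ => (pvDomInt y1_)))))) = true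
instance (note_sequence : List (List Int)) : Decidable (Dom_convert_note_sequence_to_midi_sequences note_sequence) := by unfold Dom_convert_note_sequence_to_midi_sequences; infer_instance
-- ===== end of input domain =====

-- B gathers the five attribute columns with one map per index 0-4 instead of A's single row-major loop into five accumulators.


-- ===== PORT A =====
-- loop body: append note[0..4] to the five accumulator lists (pyGetD is exact under Pre_, which puts 0..4 in range)
def pvStepA (acc : List Int × List Int × List Int × List Int × List Int) (note : List Int) :
    List Int × List Int × List Int × List Int × List Int :=
  (acc.1 ++ [PySem.List.pyGetD note 0 0],
   acc.2.1 ++ [PySem.List.pyGetD note 1 0],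
   acc.2.2.1 ++ [PySem.List.pyGetD note 2 0],
   acc.2.2.2.1 ++ [PySem.List.pyGetD note 3 0],
   acc.2.2.2.2 ++ [PySem.List.pyGetD note 4 0])

def convert_note_sequence_to_midi_sequences (note_sequence : List (List Int)) : List (List Int) :=
  let s := note_sequence.foldl pvStepA ([], [], [], [], [])
  [s.1, s.2.1, s.2.2.1, s.2.2.2.1, s.2.2.2.2]

-- ===== PORT B =====
def convert_note_sequence_to_midi_sequences_alt (note_sequence : List (List Int)) : List (List Int) :=
  (PySem.List.pyRange 0 5 1).map (fun i => note_sequence.map (fun note => PySem.List.pyGetD note i 0))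

-- ===== PRECONDITION & SPEC =====
-- Pre_ excludes exactly the inputs where A raises IndexError: a note with fewer than five fields.
def Pre_convert_note_sequence_to_midi_sequences (note_sequence : List (List Int)) : Prop :=
  ∀ note ∈ note_sequence, 5 ≤ note.length
instance (note_sequence : List (List Int)) : Decidable (Pre_convert_note_sequence_to_midi_sequences note_sequence) := by unfold Pre_convert_note_sequence_to_midi_sequences; infer_instance
def pvWitness_convert_note_sequence_to_midi_sequences : List (List Int) := [[60, 0, 4, 100, 1], [62, 4, 2, 90, 1]]

def Spec_convert_note_sequence_to_midi_sequences (note_sequence : List (List Int)) (out : List (List Int)) : Prop := out = convert_note_sequence_to_midi_sequences_alt note_sequence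
instance (note_sequence : List (List Int)) (out : List (List Int)) : Decidable (Spec_convert_note_sequence_to_midi_sequences note_sequence out) := by unfold Spec_convert_note_sequence_to_midi_sequences; infer_instance

-- ===== CLAIM (what is proved, stated in full; the proofs are below) =====
def Claim_equal_convert_note_sequence_to_midi_sequences : Prop := ∀ (note_sequence : List (List Int)), Dom_convert_note_sequence_to_midi_sequences note_sequence → Pre_convert_note_sequence_to_midi_sequences note_sequence → Spec_convert_note_sequence_to_midi_sequences note_sequence (convert_note_sequence_to_midi_sequences note_sequence)

-- ===== LEMMAS AND PROOFS =====
-- A's fold over five accumulators, characterised: each component appends that column's map.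
theorem pv_fold5 (ns : List (List Int)) (a b c d e : List Int) :
    ns.foldl pvStepA (a, b, c, d, e) =
      (a ++ ns.map (fun n => PySem.List.pyGetD n 0 0),
       b ++ ns.map (fun n => PySem.List.pyGetD n 1 0),
       c ++ ns.map (fun n => PySem.List.pyGetD n 2 0),
       d ++ ns.map (fun n => PySem.List.pyGetD n 3 0),
       e ++ ns.map (fun n => PySem.List.pyGetD n 4 0)) := by
  induction ns generalizing a b c d e with
  | nil => simp
  | cons n t ih => simp [pvStepA, ih, List.append_assoc]

-- ===== VERDICT (by name: the statement is the Claim_ definition above) =====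
theorem convert_note_sequence_to_midi_sequences_spec : Claim_equal_convert_note_sequence_to_midi_sequences := by
  intro ns _ _
  show _ = _
  simp [convert_note_sequence_to_midi_sequences, convert_note_sequence_to_midi_sequences_alt,
    pv_fold5, show PySem.List.pyRange 0 5 1 = [0, 1, 2, 3, 4] from rfl]
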